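-- pv_equiv track=rewrite | github.com/red1oon/2DtoBlender | src/core/ifc_naming_util.py | group_by_discipline
-- ===== SOURCE A (Python) =====
-- from typing import Dict, Optional, List, Any
--
-- def group_by_discipline(output_data: Dict) -> Dict[str, List[Dict]]:
--     """
--     Group objects by discipline for Blender collection creation.
--
--     Returns:
--         {
--             "ARC": {"Doors": [...], "Walls": [...]},
--             "MEP": {"Electrical": [...], "Lighting": [...]},
--             ...
--         }
--     """
--     grouped = {}
--
--     for obj in output_data.get('objects', []):
--         discipline = obj.get('discipline', 'ARC')
--         group = obj.get('group', 'Misc')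
--
--         if discipline not in grouped:
--             grouped[discipline] = {}
--         if group not in grouped[discipline]:
--             grouped[discipline][group] = []
--
--         grouped[discipline][group].append(obj)
--
--     return grouped
-- ===== SOURCE B (Python) =====
-- def group_by_discipline(output_data):
--     """Group objects by (discipline, group) via key extraction + filtering comprehensions."""
--     objs = output_data.get('objects', [])
--     keyed = [(o.get('discipline', 'ARC'), o.get('group', 'Misc')) for o in objs]
--     discs = list(dict.fromkeys(d for d, _ in keyed))
--     return {
--         d: {
--             g: [o for (d2, g2), o in zip(keyed, objs) if d2 == d and g2 == g]
--             for g in dict.fromkeys(g2 for d2, g2 in keyed if d2 == d)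
--         }
--         for d in discs
--     }
-- ===== Notes on version B (the rewrite author's own statement) =====
-- stated objective: alternative
-- what changed: Replaces A's single mutating fold that incrementally inserts into a nested dict with a declarative two-phase construction: extract each object's (discipline, group) key once, compute first-occurrence key lists with dict.fromkeys, and build the nested dict by filtering comprehensions.
import Mathlib
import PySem

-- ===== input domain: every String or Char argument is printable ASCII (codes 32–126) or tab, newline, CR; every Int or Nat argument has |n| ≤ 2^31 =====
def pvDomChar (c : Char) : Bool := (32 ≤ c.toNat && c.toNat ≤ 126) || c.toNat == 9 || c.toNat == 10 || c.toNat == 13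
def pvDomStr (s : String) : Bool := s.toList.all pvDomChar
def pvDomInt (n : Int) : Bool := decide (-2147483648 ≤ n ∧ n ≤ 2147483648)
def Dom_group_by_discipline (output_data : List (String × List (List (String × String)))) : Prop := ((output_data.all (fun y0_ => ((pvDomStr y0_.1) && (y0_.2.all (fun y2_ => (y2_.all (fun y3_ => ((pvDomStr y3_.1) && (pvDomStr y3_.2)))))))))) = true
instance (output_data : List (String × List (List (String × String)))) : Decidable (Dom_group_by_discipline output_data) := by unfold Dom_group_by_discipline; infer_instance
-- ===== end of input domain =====

-- B replaces A's mutating fold into a nested dict with a declarative construction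
-- (extract keys, first-occurrence key lists, filtering comprehensions); objective: alternative.

-- ===== PORT A =====
-- the body of A's for-loop (one helper; the loop itself is the foldl below)
def pvStepA (grouped : PySem.Dict String (PySem.Dict String (List (List (String × String)))))
    (obj : List (String × String)) :
    PySem.Dict String (PySem.Dict String (List (List (String × String)))) :=
  let discipline := (PySem.Dict.mk obj).getD "discipline" "ARC"
  let group := (PySem.Dict.mk obj).getD "group" "Misc"
  let grouped := if grouped.contains discipline then grouped
                 else grouped.insert discipline PySem.Dict.empty
  let inner := grouped.getD discipline PySem.Dict.empty
  let inner := if inner.contains group then inner else inner.insert group []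
  -- grouped[discipline][group].append(obj)
  let inner := inner.insert group (inner.getD group [] ++ [obj])
  grouped.insert discipline inner

def group_by_discipline (output_data : List (String × List (List (String × String)))) :
    List (String × List (String × List (List (String × String)))) :=
  let objs := (PySem.Dict.mk output_data).getD "objects" []
  let grouped := objs.foldl pvStepA PySem.Dict.empty
  grouped.items.map (fun p => (p.1, p.2.items))

-- ===== PORT B =====
def group_by_discipline_alt (output_data : List (String × List (List (String × String)))) :
    List (String × List (String × List (List (String × String)))) :=
  let objs := (PySem.Dict.mk output_data).getD "objects" []
  let keyed := objs.map (fun o => ((PySem.Dict.mk o).getD "discipline" "ARC",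
                                   (PySem.Dict.mk o).getD "group" "Misc"))
  let discs := PySem.List.dedup (keyed.map (·.1))
  discs.map (fun d =>
    (d, (PySem.List.dedup ((keyed.filter (fun p => p.1 == d)).map (·.2))).map (fun g =>
      (g, ((keyed.zip objs).filter (fun p => p.1.1 == d && p.1.2 == g)).map (·.2)))))

-- ===== PRECONDITION & SPEC =====
def Spec_group_by_discipline (output_data : List (String × List (List (String × String)))) (out : List (String × List (String × List (List (String × String))))) : Prop := out = group_by_discipline_alt output_data
instance (output_data : List (String × List (List (String × String)))) (out : List (String × List (String × List (List (String × String))))) : Decidable (Spec_group_by_discipline output_data out) := by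
  unfold Spec_group_by_discipline
  have h1 : DecidableEq (List (List (String × String))) := inferInstance
  have h2 : DecidableEq (String × List (List (String × String))) := inferInstance
  have h3 : DecidableEq (List (String × List (List (String × String)))) := inferInstance
  have h4 : DecidableEq (String × List (String × List (List (String × String)))) := inferInstance
  infer_instance

-- ===== CLAIM (what is proved, stated in full; the proofs are below) =====
def Claim_equal_group_by_discipline : Prop := ∀ (output_data : List (String × List (List (String × String)))), Dom_group_by_discipline output_data → Spec_group_by_discipline output_data (group_by_discipline output_data)

-- ===== LEMMAS AND PROOFS =====

-- the two key extractors (proof-side abbreviations)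
def pvK1 (o : List (String × String)) : String := (PySem.Dict.mk o).getD "discipline" "ARC"
def pvK2 (o : List (String × String)) : String := (PySem.Dict.mk o).getD "group" "Misc"

-- A's loop body, simplified: one nested insert keyed by (pvK1, pvK2)
theorem pvStepA_eq (grouped : PySem.Dict String (PySem.Dict String (List (List (String × String)))))
    (obj : List (String × String)) :
    pvStepA grouped obj =
      grouped.insert (pvK1 obj)
        ((grouped.getD (pvK1 obj) PySem.Dict.empty).insert (pvK2 obj)
          ((grouped.getD (pvK1 obj) PySem.Dict.empty).getD (pvK2 obj) [] ++ [obj])) := by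
  unfold pvStepA pvK1 pvK2
  by_cases h1 : grouped.contains ((PySem.Dict.mk obj).getD "discipline" "ARC")
  · simp only [h1, if_true]
    by_cases h2 : (grouped.getD ((PySem.Dict.mk obj).getD "discipline" "ARC") PySem.Dict.empty).contains
        ((PySem.Dict.mk obj).getD "group" "Misc")
    · simp only [h2, if_true]
    · simp only [Bool.not_eq_true] at h2
      simp [h2, PySem.Dict.getD_insert_self, PySem.Dict.getD_of_not_contains _ _ h2,
        PySem.Dict.insert_insert_self]
  · simp only [Bool.not_eq_true] at h1
    simp only [h1, if_false, Bool.false_eq_true,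
      PySem.Dict.getD_insert_self, PySem.Dict.getD_of_not_contains _ _ h1,
      PySem.Dict.insert_insert_self, PySem.Dict.contains_empty, PySem.Dict.getD_empty]

-- looking up key d after an insert-keyed fold = folding over the elements whose key is d
theorem pvGetD_foldl_insert_key {κ ν α : Type} [BEq κ] [LawfulBEq κ] [DecidableEq κ]
    (key : α → κ) (f : ν → α → ν) (e : ν) :
    ∀ (l : List α) (acc : PySem.Dict κ ν) (d : κ),
    (l.foldl (fun G o => G.insert (key o) (f (G.getD (key o) e) o)) acc).getD d e
      = (l.filter (fun o => key o == d)).foldl f (acc.getD d e) := by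
  intro l
  induction l with
  | nil => intro acc d; rfl
  | cons o t ih =>
    intro acc d
    rw [List.foldl_cons, List.filter_cons, ih]
    by_cases h : key o = d
    · subst h; simp [PySem.Dict.getD_insert_self]
    · have h' : d ≠ key o := fun hd => h hd.symm
      simp [h, h', PySem.Dict.getD_insert]

-- the inner dict A accumulates for discipline d, as a function of the filtered objects
theorem pvInner_eq (objs : List (List (String × String))) (d : String) :
    ((objs.foldl (fun G o => G.insert (pvK1 o)
        ((G.getD (pvK1 o) PySem.Dict.empty).insert (pvK2 o)
          ((G.getD (pvK1 o) PySem.Dict.empty).getD (pvK2 o) [] ++ [o]))) PySem.Dict.empty).getD d PySem.Dict.empty)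
      = (objs.filter (fun o => pvK1 o == d)).foldl
          (fun i o => i.insert (pvK2 o) (i.getD (pvK2 o) [] ++ [o])) PySem.Dict.empty := by
  rw [pvGetD_foldl_insert_key pvK1
    (fun (i : PySem.Dict String (List (List (String × String)))) o =>
      i.insert (pvK2 o) (i.getD (pvK2 o) [] ++ [o])) PySem.Dict.empty objs PySem.Dict.empty d]
  simp [PySem.Dict.getD_empty]

theorem group_by_discipline_core (objs : List (List (String × String))) :
    (objs.foldl pvStepA PySem.Dict.empty).items.map (fun p => (p.1, p.2.items))
      = (PySem.List.dedup (objs.map pvK1)).map (fun d =>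
          (d, (PySem.List.dedup ((objs.filter (fun o => pvK1 o == d)).map pvK2)).map (fun g =>
            (g, objs.filter (fun o => pvK1 o == d && pvK2 o == g))))) := by
  have hstep : pvStepA = fun G o => G.insert (pvK1 o)
      ((G.getD (pvK1 o) PySem.Dict.empty).insert (pvK2 o)
        ((G.getD (pvK1 o) PySem.Dict.empty).getD (pvK2 o) [] ++ [o])) := by
    funext G o; exact pvStepA_eq G o
  rw [hstep]
  set F := objs.foldl (fun G o => G.insert (pvK1 o)
      ((G.getD (pvK1 o) PySem.Dict.empty).insert (pvK2 o)
        ((G.getD (pvK1 o) PySem.Dict.empty).getD (pvK2 o) [] ++ [o]))) PySem.Dict.empty with hF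
  have hnd : F.keys.Nodup := by
    rw [hF]
    exact PySem.Dict.nodup_keys_foldl_insert_key objs pvK1 _ PySem.Dict.empty (by simp)
  have hkeys : F.keys = PySem.List.dedup (objs.map pvK1) := by
    rw [hF, PySem.Dict.keys_foldl_insert_key objs pvK1 _ PySem.Dict.empty,
      PySem.Dict.keys_empty, PySem.Set.update_nil_left, PySem.List.dedup_eq_ofList]
  rw [PySem.Dict.items_eq_map_keys F hnd PySem.Dict.empty, hkeys, List.map_map]
  apply List.map_congr_left
  intro d _
  have hFd : F.getD d PySem.Dict.empty = (objs.filter (fun o => pvK1 o == d)).foldl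
      (fun i o => i.insert (pvK2 o) (i.getD (pvK2 o) [] ++ [o])) PySem.Dict.empty := by
    rw [hF]; exact pvInner_eq objs d
  simp only [Function.comp_apply, hFd]
  set G := (objs.filter (fun o => pvK1 o == d)).foldl
      (fun i o => i.insert (pvK2 o) (i.getD (pvK2 o) [] ++ [o])) PySem.Dict.empty with hG
  have hndG : G.keys.Nodup := by
    rw [hG]
    exact PySem.Dict.nodup_keys_foldl_insert_key _ pvK2 _ PySem.Dict.empty (by simp)
  have hkeysG : G.keys = PySem.List.dedup ((objs.filter (fun o => pvK1 o == d)).map pvK2) := by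
    rw [hG, PySem.Dict.keys_foldl_insert_key _ pvK2 _ PySem.Dict.empty,
      PySem.Dict.keys_empty, PySem.Set.update_nil_left, PySem.List.dedup_eq_ofList]
  rw [PySem.Dict.items_eq_map_keys G hndG ([] : List (List (String × String))), hkeysG]
  refine congrArg _ ?_
  apply List.map_congr_left
  intro g _
  have hGg : G.getD g [] = objs.filter (fun o => pvK1 o == d && pvK2 o == g) := by
    rw [hG, pvGetD_foldl_insert_key pvK2 (fun acc o => acc ++ [o]) ([] : List (List (String × String)))]
    rw [PySem.Dict.getD_empty, PySem.List.foldl_append_singleton, List.nil_append,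
      List.filter_filter]
    apply List.filter_congr
    intro o _
    rw [Bool.and_comm]
  rw [hGg]

-- B's body, rewritten through the key extractors
theorem group_by_discipline_alt_core (objs : List (List (String × String))) :
    (PySem.List.dedup ((objs.map (fun o => (pvK1 o, pvK2 o))).map (·.1))).map (fun d =>
      (d, (PySem.List.dedup (((objs.map (fun o => (pvK1 o, pvK2 o))).filter
            (fun p => p.1 == d)).map (·.2))).map (fun g =>
        (g, (((objs.map (fun o => (pvK1 o, pvK2 o))).zip objs).filter
              (fun p => p.1.1 == d && p.1.2 == g)).map (·.2)))))
      = (PySem.List.dedup (objs.map pvK1)).map (fun d =>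
          (d, (PySem.List.dedup ((objs.filter (fun o => pvK1 o == d)).map pvK2)).map (fun g =>
            (g, objs.filter (fun o => pvK1 o == d && pvK2 o == g))))) := by
  have hzip : (objs.map (fun o => (pvK1 o, pvK2 o))).zip objs
      = objs.map (fun o => ((pvK1 o, pvK2 o), o)) := by
    have h := List.zip_map' (f := fun o => (pvK1 o, pvK2 o)) (g := id) (l := objs)
    simpa using h
  rw [hzip]
  simp only [List.map_map, List.filter_map, Function.comp_def]
  simp only [List.map_id']

-- ===== VERDICT (by name: the statement is the Claim_ definition above) =====
theorem group_by_discipline_spec : Claim_equal_group_by_discipline := by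
  intro output_data _
  unfold Spec_group_by_discipline group_by_discipline group_by_discipline_alt
  show (((PySem.Dict.mk output_data).getD "objects" []).foldl pvStepA PySem.Dict.empty).items.map
      (fun p => (p.1, p.2.items)) = _
  rw [group_by_discipline_core]
  exact (group_by_discipline_alt_core _).symm
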